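-- pv_equiv track=rewrite | github.com/applied-cyber/ccdc | scripts/database_redaction.py | decode_sql_string
-- ===== SOURCE A (Python) =====
-- def decode_sql_string(token):
--     if token == "NULL":
--         return None
--     if len(token) >= 2 and token[0] == token[-1] == "'":
--         body = token[1:-1]
--         out, i = [], 0
--         while i < len(body):
--             if body[i] == "\\" and i + 1 < len(body):
--                 nxt = body[i + 1]
--                 out.append({"0": "\0", "n": "\n", "r": "\r", "t": "\t", "Z": "\x1a"}.get(nxt, nxt))
--                 i += 2
--             else:
--                 out.append(body[i])
--                 i += 1
--         return "".join(out)
--     return token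
-- ===== SOURCE B (Python) =====
-- ESC = {"0": "\0", "n": "\n", "r": "\r", "t": "\t", "Z": "\x1a"}
--
-- def decode_sql_string(token):
--     if token == "NULL":
--         return None
--     if len(token) < 2 or token[0] != "'" or token[-1] != "'":
--         return token
--     parts = token[1:-1].split("\\")
--     pieces = [parts[0]]
--     i = 1
--     while i < len(parts):
--         p = parts[i]
--         if p:
--             # the backslash before this part escapes its first character
--             pieces.append(ESC.get(p[0], p[0]) + p[1:])
--             i += 1
--         elif i + 1 < len(parts):
--             # backslash escapes the following backslash; next part is literal
--             pieces.append("\\" + parts[i + 1])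
--             i += 2
--         else:
--             # trailing lone backslash stays
--             pieces.append("\\")
--             i += 1
--     return "".join(pieces)
-- ===== Notes on version B (the rewrite author's own statement) =====
-- stated objective: alternative
-- what changed: Replaces A's manual index-walk over the body (checking for a backslash and skipping two positions) with str.split('\\') followed by a single pass over the parts list that re-assembles them, mapping each part's first character through the ESC table.
import Mathlib
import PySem

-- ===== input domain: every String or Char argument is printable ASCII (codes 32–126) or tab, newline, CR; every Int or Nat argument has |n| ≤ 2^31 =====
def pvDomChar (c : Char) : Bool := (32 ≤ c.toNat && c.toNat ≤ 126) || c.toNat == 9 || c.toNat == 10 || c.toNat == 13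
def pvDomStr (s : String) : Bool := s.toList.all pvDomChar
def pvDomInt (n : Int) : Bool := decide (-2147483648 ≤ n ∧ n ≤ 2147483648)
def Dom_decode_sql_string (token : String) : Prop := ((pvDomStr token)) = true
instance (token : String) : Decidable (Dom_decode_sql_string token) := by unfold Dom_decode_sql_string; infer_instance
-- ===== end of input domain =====

-- B replaces A's manual index-walk over the body with split("\\") plus a single pass
-- over the parts (objective: alternative decomposition, same cost; return value only, no mutation).

-- ===== PORT A =====
-- the escape dict {"0": "\0", …}.get(nxt, nxt), written as the chained lookup A performs
def escA (c : Char) : Char :=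
  if c = '0' then Char.ofNat 0
  else if c = 'n' then '\n'
  else if c = 'r' then '\r'
  else if c = 't' then '\t'
  else if c = 'Z' then Char.ofNat 26
  else c

-- A's while loop: i walks the body, a backslash with a following char consumes two
def loopA : List Char → List Char
  | [] => []
  | c :: rest =>
    if c = '\\' then
      match rest with
      | nxt :: rest' => escA nxt :: loopA rest'
      | [] => c :: loopA []      -- i + 1 < len(body) fails: append the char itself
    else c :: loopA rest

def decode_sql_string (token : String) : Option String :=
  if token = "NULL" then none
  else
    let cs := token.toList
    if 2 ≤ cs.length ∧ PySem.List.pyGet? cs 0 = some '\'' ∧ PySem.List.pyGet? cs (-1) = some '\'' then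
      some (String.ofList (loopA (PySem.List.slice cs (some 1) (some (-1)))))
    else some token

-- ===== PORT B =====
-- module-level ESC dict
def ESC : PySem.Dict Char Char :=
  PySem.Dict.ofList [('0', Char.ofNat 0), ('n', '\n'), ('r', '\r'), ('t', '\t'), ('Z', Char.ofNat 26)]

-- Source B's while loop over parts[1:]: each part was preceded by a backslash
def decTail : List (List Char) → List Char
  | [] => []
  | (c :: cs) :: rest => (PySem.Dict.getD ESC c c :: cs) ++ decTail rest
  | [] :: next :: rest => '\\' :: (next ++ decTail rest)
  | [[]] => ['\\']

def decode_sql_string_alt (token : String) : Option String :=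
  if token = "NULL" then none
  else
    let cs := token.toList
    if cs.length < 2 ∨ cs.head? ≠ some '\'' ∨ cs.getLast? ≠ some '\'' then some token
    else
      let parts := (PySem.List.slice cs (some 1) (some (-1))).splitOn '\\'
      some (String.ofList (parts.headD [] ++ decTail parts.tail))

-- ===== PRECONDITION & SPEC =====
def Spec_decode_sql_string (token : String) (out : Option String) : Prop := out = decode_sql_string_alt token
instance (token : String) (out : Option String) : Decidable (Spec_decode_sql_string token out) := by unfold Spec_decode_sql_string; infer_instance

-- ===== CLAIM (what is proved, stated in full; the proofs are below) =====
def Claim_equal_decode_sql_string : Prop := ∀ (token : String), Dom_decode_sql_string token → Spec_decode_sql_string token (decode_sql_string token)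

-- ===== LEMMAS AND PROOFS =====

-- dict lookup agrees with A's chained lookup
theorem escA_eq_getD (c : Char) : PySem.Dict.getD ESC c c = escA c := by
  unfold escA
  by_cases h0 : c = '0'
  · subst h0; decide
  rw [if_neg h0]
  by_cases hn : c = 'n'
  · subst hn; decide
  rw [if_neg hn]
  by_cases hr : c = 'r'
  · subst hr; decide
  rw [if_neg hr]
  by_cases ht : c = 't'
  · subst ht; decide
  rw [if_neg ht]
  by_cases hz : c = 'Z'
  · subst hz; decide
  rw [if_neg hz]
  have hitems : ESC.items = [('0', Char.ofNat 0), ('n', '\n'), ('r', Char.ofNat 13), ('t', '\t'), ('Z', Char.ofNat 26)] := by decide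
  have e0 : ('0' == c) = false := beq_eq_false_iff_ne.mpr (Ne.symm h0)
  have en : ('n' == c) = false := beq_eq_false_iff_ne.mpr (Ne.symm hn)
  have er : ('r' == c) = false := beq_eq_false_iff_ne.mpr (Ne.symm hr)
  have et : ('t' == c) = false := beq_eq_false_iff_ne.mpr (Ne.symm ht)
  have ez : ('Z' == c) = false := beq_eq_false_iff_ne.mpr (Ne.symm hz)
  simp [PySem.Dict.getD, PySem.Dict.get?, hitems, List.find?, e0, en, er, et, ez]

theorem splitOn_char_cons (c : Char) (xs : List Char) (a : Char) :
    (c :: xs).splitOn a = if c = a then [] :: xs.splitOn a else (xs.splitOn a).modifyHead (List.cons c) := by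
  simp only [List.splitOn, List.splitOnP_cons, beq_iff_eq]

-- the key invariant: A's walk equals first-part-literal ++ decTail of the remaining parts
theorem key (bs : List Char) :
    loopA bs = (bs.splitOn '\\').headD [] ++ decTail (bs.splitOn '\\').tail := by
  match bs with
  | [] => simp [loopA, List.splitOn_nil, decTail]
  | c :: rest =>
    by_cases hc : c = '\\'
    · subst hc
      rw [splitOn_char_cons, if_pos rfl]
      match rest with
      | [] => simp [loopA, List.splitOn_nil, decTail]
      | n :: rest' =>
        have ih := key rest'
        by_cases hn : n = '\\'
        · subst hn
          rw [splitOn_char_cons, if_pos rfl]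
          obtain ⟨q, t, hqt⟩ : ∃ q t, rest'.splitOn '\\' = q :: t := by
            rcases h : rest'.splitOn '\\' with _ | ⟨q, t⟩
            · exact absurd h (List.splitOnP_ne_nil _ _)
            · exact ⟨q, t, rfl⟩
          rw [hqt] at ih ⊢
          simp only [List.headD, List.tail] at ih ⊢
          show loopA ('\\' :: '\\' :: rest') = decTail ([] :: q :: t)
          have hesc : escA '\\' = '\\' := by decide
          simp [loopA, decTail, ih, hesc]
        · rw [splitOn_char_cons, if_neg hn]
          obtain ⟨q, t, hqt⟩ : ∃ q t, rest'.splitOn '\\' = q :: t := by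
            rcases h : rest'.splitOn '\\' with _ | ⟨q, t⟩
            · exact absurd h (List.splitOnP_ne_nil _ _)
            · exact ⟨q, t, rfl⟩
          rw [hqt] at ih ⊢
          simp only [List.headD, List.tail, List.modifyHead] at ih ⊢
          show loopA ('\\' :: n :: rest') = decTail ((n :: q) :: t)
          simp [loopA, decTail, ih, escA_eq_getD]
    · have ih := key rest
      rw [splitOn_char_cons, if_neg hc]
      obtain ⟨q, t, hqt⟩ : ∃ q t, rest.splitOn '\\' = q :: t := by
        rcases h : rest.splitOn '\\' with _ | ⟨q, t⟩
        · exact absurd h (List.splitOnP_ne_nil _ _)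
        · exact ⟨q, t, rfl⟩
      rw [hqt] at ih ⊢
      simp only [List.headD, List.tail, List.modifyHead] at ih ⊢
      have step : loopA (c :: rest) = c :: loopA rest := by
        rcases rest with _ | ⟨m, r2⟩ <;> simp [loopA, hc]
      rw [step, ih, List.cons_append]
termination_by bs.length
decreasing_by all_goals (simp; try omega)

-- the two guard conditions are complementary formulations of the same test
theorem guard_iff (cs : List Char) :
    (2 ≤ cs.length ∧ PySem.List.pyGet? cs 0 = some '\'' ∧ PySem.List.pyGet? cs (-1) = some '\'') ↔
    ¬ (cs.length < 2 ∨ cs.head? ≠ some '\'' ∨ cs.getLast? ≠ some '\'') := by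
  rw [PySem.List.pyGet?_zero, PySem.List.pyGet?_neg_one]
  constructor
  · rintro ⟨h1, h2, h3⟩
    push Not
    exact ⟨h1, by rw [List.head?_eq_getElem?]; exact h2, h3⟩
  · intro h
    push Not at h
    exact ⟨h.1, by rw [← List.head?_eq_getElem?]; exact h.2.1, h.2.2⟩

-- ===== VERDICT (by name: the statement is the Claim_ definition above) =====
theorem decode_sql_string_spec : Claim_equal_decode_sql_string := by
  intro token _
  unfold Spec_decode_sql_string decode_sql_string decode_sql_string_alt
  by_cases hN : token = "NULL"
  · simp [hN]
  · simp only [if_neg hN]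
    by_cases hg : 2 ≤ token.toList.length ∧ PySem.List.pyGet? token.toList 0 = some '\'' ∧
        PySem.List.pyGet? token.toList (-1) = some '\''
    · rw [if_pos hg, if_neg ((guard_iff token.toList).mp hg), key]
    · rw [if_neg hg]
      have : token.toList.length < 2 ∨ token.toList.head? ≠ some '\'' ∨ token.toList.getLast? ≠ some '\'' := by
        by_contra h
        exact hg ((guard_iff token.toList).mpr h)
      rw [if_pos this]
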